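-- pv_equiv track=rewrite | github.com/cloudXia777/EPAD | MAIN_Annotator.py | getEntIndex
-- ===== SOURCE A (Python) =====
-- def getEntIndex(text, ent):
--     '''
--     获取选中实体在英文文本间隔下的位置
--     :param text: 原始文本
--     :param ent: 选中文本
--     :return: 英文位置
--     '''
--     text_list = text.strip().split()
--     ent = ent.strip().split()
--     begin = 0
--     end = 0
--     for _idx, word in enumerate(text_list, 1):
--         if ent[0] in word:
--             begin = _idx
--             if len(ent) == 1:
--                 end = _idx
--         if len(ent) != 1:
--             if ent[-1] in word:
--                 end = _idx
--     return begin, end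
-- ===== SOURCE B (Python) =====
-- def getEntIndex(text, ent):
--     text_list = text.strip().split()
--     ent = ent.strip().split()
--     begin = 0
--     end = 0
--     for i in range(len(text_list) - 1, -1, -1):
--         if ent[0] in text_list[i]:
--             begin = i + 1
--             break
--     for i in range(len(text_list) - 1, -1, -1):
--         if ent[-1] in text_list[i]:
--             end = i + 1
--             break
--     return begin, end
-- ===== Notes on version B (the rewrite author's own statement) =====
-- stated objective: alternative
-- what changed: A's single forward fold over enumerate(text_list,1) with two interacting running variables (last match wins) is replaced by two independent reverse scans that break on the first word containing ent[0] resp. ent[-1].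
import Mathlib
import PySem

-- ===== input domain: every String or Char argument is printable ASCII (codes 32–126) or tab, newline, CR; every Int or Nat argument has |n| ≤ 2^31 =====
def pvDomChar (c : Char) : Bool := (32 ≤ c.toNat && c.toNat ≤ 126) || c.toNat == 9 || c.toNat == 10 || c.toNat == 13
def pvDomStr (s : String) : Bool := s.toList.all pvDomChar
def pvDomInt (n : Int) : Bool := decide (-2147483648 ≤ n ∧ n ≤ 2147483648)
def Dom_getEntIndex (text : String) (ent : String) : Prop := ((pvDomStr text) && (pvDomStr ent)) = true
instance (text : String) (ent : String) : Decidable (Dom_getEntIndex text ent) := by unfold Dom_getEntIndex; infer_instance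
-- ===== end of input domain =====

-- B replaces A's single forward fold over enumerate(text_list, 1) (two interacting running
-- variables, last match wins) by two independent reverse scans that stop at the first hit.

-- ===== PORT A =====
-- literal transliteration of A: one forward loop over enumerate(text_list, 1) carrying (begin, end).
-- ent[0] / ent[-1] are ported with pyGetD (default ""): inside Pre_ the index is always in range
-- when the loop body runs (Python raises IndexError exactly on the inputs Pre_ excludes).
def getEntIndex (text : String) (ent : String) : Int × Int :=
  let textList := PySem.Str.split₀ (PySem.Str.strip text)
  let entList := PySem.Str.split₀ (PySem.Str.strip ent)
  (PySem.List.enumerate textList 1).foldl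
    (fun be p =>
      let be1 :=
        if PySem.Str.isIn (PySem.List.pyGetD entList 0 "") p.2 then
          (p.1, if entList.length = 1 then p.1 else be.2)
        else be
      if entList.length ≠ 1 then
        if PySem.Str.isIn (PySem.List.pyGetD entList (-1) "") p.2 then (be1.1, p.1) else be1
      else be1)
    (0, 0)

-- ===== PORT B =====
-- B-side helper: the reverse loop 'for i in range(len(textList)-1, -1, -1): if entList[k] in
-- textList[i]: return i+1' with break; returns 0 if no word matches.  The ent subscript is read
-- inside the loop body, exactly as in Source B.
def pvRevScan (textList entList : List String) (k : Int) : Nat → Int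
  | 0 => 0
  | n + 1 =>
    if PySem.Str.isIn (PySem.List.pyGetD entList k "") (PySem.List.pyGetD textList (n : Int) "")
    then (n : Int) + 1
    else pvRevScan textList entList k n

def getEntIndex_alt (text : String) (ent : String) : Int × Int :=
  let textList := PySem.Str.split₀ (PySem.Str.strip text)
  let entList := PySem.Str.split₀ (PySem.Str.strip ent)
  (pvRevScan textList entList 0 textList.length,
   pvRevScan textList entList (-1) textList.length)

-- ===== PRECONDITION & SPEC =====
-- Pre_ excludes exactly the inputs where Python A raises IndexError: ent has no tokens while
-- text has some (ent[0] is read in the first loop iteration).  B raises there too.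
def Pre_getEntIndex (text : String) (ent : String) : Prop :=
  PySem.Str.split₀ (PySem.Str.strip ent) = [] → PySem.Str.split₀ (PySem.Str.strip text) = []
instance (text : String) (ent : String) : Decidable (Pre_getEntIndex text ent) := by
  unfold Pre_getEntIndex; infer_instance

def pvWitness_getEntIndex : String × String := ("the cat sat", "cat")

def Spec_getEntIndex (text : String) (ent : String) (out : Int × Int) : Prop := out = getEntIndex_alt text ent
instance (text : String) (ent : String) (out : Int × Int) : Decidable (Spec_getEntIndex text ent out) := by unfold Spec_getEntIndex; infer_instance

-- ===== CLAIM (what is proved, stated in full; the proofs are below) =====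
def Claim_equal_getEntIndex : Prop := ∀ (text : String) (ent : String), Dom_getEntIndex text ent → Pre_getEntIndex text ent → Spec_getEntIndex text ent (getEntIndex text ent)

-- ===== LEMMAS AND PROOFS =====

-- a scan that only reads indices < n does not see an appended element
theorem pvRevScan_append (xs : List String) (w : String) (el : List String) (k : Int) :
    ∀ n, n ≤ xs.length → pvRevScan (xs ++ [w]) el k n = pvRevScan xs el k n := by
  intro n
  induction n with
  | zero => intro _; rfl
  | succ m ih =>
    intro h
    simp only [pvRevScan]
    rw [PySem.List.pyGetD_natCast, PySem.List.pyGetD_natCast,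
        List.getD_eq_getElem?_getD, List.getD_eq_getElem?_getD,
        List.getElem?_append_left (by omega), ih (by omega)]

-- the forward fold with step 'if tok in word then idx else acc' over enumerate(tl, 1)
-- equals the reverse first-hit scan
theorem pvFold_eq_revScan (el : List String) (k : Int) :
    ∀ tl : List String,
      (PySem.List.enumerate tl 1).foldl
        (fun (b : Int) (p : Int × String) =>
          if PySem.Str.isIn (PySem.List.pyGetD el k "") p.2 then p.1 else b) 0
      = pvRevScan tl el k tl.length := by
  intro tl
  induction tl using List.reverseRecOn with
  | nil => rfl
  | append_singleton xs w ih =>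
    rw [PySem.List.enumerate_append, List.foldl_append]
    simp only [PySem.List.enumerate_cons, PySem.List.enumerate_nil, List.foldl_cons,
      List.foldl_nil, List.length_append, List.length_singleton]
    rw [ih]
    have hn : xs.length + 1 = Nat.succ xs.length := rfl
    rw [hn]
    simp only [pvRevScan]
    rw [PySem.List.pyGetD_natCast, List.getD_eq_getElem?_getD,
        List.getElem?_append_right (by omega)]
    simp only [Nat.sub_self, List.getElem?_cons_zero, Option.getD_some]
    rw [pvRevScan_append xs w el k xs.length (le_refl _)]
    split
    · ring
    · rfl

-- A's compound step computes, componentwise, the two simple 'last match' steps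
theorem pvStep_eq (el : List String) (be : Int × Int) (p : Int × String) :
    (let be1 :=
        if PySem.Str.isIn (PySem.List.pyGetD el 0 "") p.2 then
          (p.1, if el.length = 1 then p.1 else be.2)
        else be
     if el.length ≠ 1 then
        if PySem.Str.isIn (PySem.List.pyGetD el (-1) "") p.2 then (be1.1, p.1) else be1
     else be1)
    = ((if PySem.Str.isIn (PySem.List.pyGetD el 0 "") p.2 then p.1 else be.1),
       (if PySem.Str.isIn (PySem.List.pyGetD el (-1) "") p.2 then p.1 else be.2)) := by
  by_cases h1 : el.length = 1
  · -- el is a singleton, so el[0] = el[-1]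
    obtain ⟨x, hx⟩ : ∃ x, el = [x] := by
      cases el with
      | nil => simp at h1
      | cons a t => cases t with
        | nil => exact ⟨a, rfl⟩
        | cons b t' => simp at h1
    subst hx
    have h0 : PySem.List.pyGetD [x] (0 : Int) "" = x := rfl
    have hm : PySem.List.pyGetD [x] (-1 : Int) "" = x := rfl
    simp only [h0, hm, h1, ne_eq, not_true_eq_false, if_false]
    split <;> simp
  · simp only [h1, ne_eq, not_false_eq_true, if_true]
    split_ifs <;> simp_all

-- A's paired fold splits into two independent folds (then each equals a reverse scan)
theorem pvFold_pair (el : List String) (tl : List String) :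
    ∀ (s : Int) (init : Int × Int),
      (PySem.List.enumerate tl s).foldl
        (fun be (p : Int × String) =>
          let be1 :=
            if PySem.Str.isIn (PySem.List.pyGetD el 0 "") p.2 then
              (p.1, if el.length = 1 then p.1 else be.2)
            else be
          if el.length ≠ 1 then
            if PySem.Str.isIn (PySem.List.pyGetD el (-1) "") p.2 then (be1.1, p.1) else be1
          else be1) init
      = ((PySem.List.enumerate tl s).foldl
           (fun b (p : Int × String) =>
             if PySem.Str.isIn (PySem.List.pyGetD el 0 "") p.2 then p.1 else b) init.1,
         (PySem.List.enumerate tl s).foldl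
           (fun b (p : Int × String) =>
             if PySem.Str.isIn (PySem.List.pyGetD el (-1) "") p.2 then p.1 else b) init.2) := by
  induction tl with
  | nil => intro s init; simp [PySem.List.enumerate_nil]
  | cons x xs ih =>
    intro s init
    simp only [PySem.List.enumerate_cons, List.foldl_cons]
    rw [ih, pvStep_eq el init (s, x)]

-- ===== VERDICT (by name: the statement is the Claim_ definition above) =====
theorem getEntIndex_spec : Claim_equal_getEntIndex := by
  intro text ent _ _
  unfold Spec_getEntIndex getEntIndex getEntIndex_alt
  simp only []
  rw [pvFold_pair, pvFold_eq_revScan, pvFold_eq_revScan]
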